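-- pv_equiv track=rewrite | github.com/merneo/wapi | wapi/utils/tld.py | extract_tld
-- ===== SOURCE A (Python) =====
-- from typing import List, Optional, Set, Tuple
--
-- MULTI_LEVEL_TLDS: Set[str] = {
--     'co.uk', 'org.uk', 'me.uk',
--     'com.au', 'com.br', 'com.mx',
-- }
--
-- def extract_tld(domain: str) -> Optional[str]:
--     """
--     Extract TLD from a domain name.
--
--     Handles both single-level (e.g., 'example.com' -> 'com')
--     and multi-level TLDs (e.g., 'example.co.uk' -> 'co.uk').
--
--     Args:
--         domain: Domain name (e.g., 'example.com', 'example.co.uk')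
--
--     Returns:
--         TLD string or None if domain is invalid
--
--     Examples:
--         >>> extract_tld('example.com')
--         'com'
--         >>> extract_tld('example.co.uk')
--         'co.uk'
--         >>> extract_tld('invalid')
--         None
--     """
--     if not domain or '.' not in domain:
--         return None
--
--     domain_lower = domain.lower().strip()
--
--     # Check for multi-level TLDs first (e.g., co.uk, com.au)
--     for multi_tld in sorted(MULTI_LEVEL_TLDS, key=len, reverse=True):
--         if domain_lower.endswith(f'.{multi_tld}'):
--             return multi_tld
--
--     # Extract single-level TLD
--     parts = domain_lower.split('.')
--     # Note: After checking for '.' on line 76, split('.') will always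
--     # return at least 2 parts, so len(parts) < 2 should never be true.
--     # However, we keep this check for defensive programming and edge cases.
--     if len(parts) < 2:  # pragma: no cover
--         return None
--
--     return parts[-1]
-- ===== SOURCE B (Python) =====
-- from typing import Optional, Set
--
-- MULTI_LEVEL_TLDS: Set[str] = {
--     'co.uk', 'org.uk', 'me.uk',
--     'com.au', 'com.br', 'com.mx',
-- }
--
-- def extract_tld(domain: str) -> Optional[str]:
--     """Extract the TLD by splitting once and testing the two-part suffix."""
--     if not domain or '.' not in domain:
--         return None
--     parts = domain.lower().strip().split('.')
--     tail2 = '.'.join(parts[-2:])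
--     if len(parts) > 2 and tail2 in MULTI_LEVEL_TLDS:
--         return tail2
--     # splitting always yields at least one piece, so parts[-1] is safe
--     return parts[-1]
-- ===== Notes on version B (the rewrite author's own statement) =====
-- stated objective: simpler
-- what changed: Instead of looping over the TLD set testing whether the domain ends with each dot-prefixed entry, B splits the lowered/stripped domain once at the dot separators and does a single set-membership test of the joined two-part suffix, returning it when the domain has more than two parts, else the last part.
import Mathlib
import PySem

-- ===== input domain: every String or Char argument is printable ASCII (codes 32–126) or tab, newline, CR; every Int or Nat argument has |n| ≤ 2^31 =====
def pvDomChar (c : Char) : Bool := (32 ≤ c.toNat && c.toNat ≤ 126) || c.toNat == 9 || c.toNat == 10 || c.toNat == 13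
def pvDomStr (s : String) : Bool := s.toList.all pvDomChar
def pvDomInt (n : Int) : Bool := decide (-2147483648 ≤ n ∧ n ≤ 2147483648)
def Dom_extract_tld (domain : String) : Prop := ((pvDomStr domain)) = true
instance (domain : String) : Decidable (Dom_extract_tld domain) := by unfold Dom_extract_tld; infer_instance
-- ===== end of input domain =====

-- B replaces A's loop over the TLD set (one endswith test per set element) by a single
-- split of the domain and one set-membership test of the joined two-part suffix (simpler).

-- ===== PORT A =====
-- MULTI_LEVEL_TLDS as sorted(…, key=len, reverse=True) yields the four 6-char TLDs
-- (within equal length, in the set's unspecified iteration order) before the two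
-- 5-char ones.  The loop's result does not depend on that order: at most one
-- dot-prefixed tld can match as a suffix.
def pvTldsA : List (List Char) :=
  [['o','r','g','.','u','k'], ['c','o','m','.','a','u'], ['c','o','m','.','b','r'],
   ['c','o','m','.','m','x'], ['c','o','.','u','k'], ['m','e','.','u','k']]

-- the loop 'for multi_tld in sorted(…): if domain_lower.endswith(dot + multi_tld): return multi_tld'
def pvFindTld (s : List Char) : List (List Char) → Option (List Char)
  | [] => none
  | t :: ts => if PySem.Chars.endswith s ('.' :: t) then some t else pvFindTld s ts

def extract_tld (domain : String) : Option String :=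
  if domain.toList = [] ∨ PySem.Chars.isIn ['.'] domain.toList = false then none
  else
    let domain_lower := PySem.Chars.strip (PySem.Chars.lower domain.toList)
    match pvFindTld domain_lower pvTldsA with
    | some t => some (String.ofList t)
    | none =>
      let parts := PySem.Chars.splitOn domain_lower ['.']
      if parts.length < 2 then none
      else some (String.ofList (PySem.List.pyGetD parts (-1) []))

-- ===== PORT B =====
def pvMulti : PySem.Set (List Char) :=
  PySem.Set.ofList
    [['c','o','.','u','k'], ['o','r','g','.','u','k'], ['m','e','.','u','k'],
     ['c','o','m','.','a','u'], ['c','o','m','.','b','r'], ['c','o','m','.','m','x']]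

def extract_tld_alt (domain : String) : Option String :=
  if domain.toList = [] ∨ PySem.Chars.isIn ['.'] domain.toList = false then none
  else
    let parts := PySem.Chars.splitOn (PySem.Chars.strip (PySem.Chars.lower domain.toList)) ['.']
    let tail2 := PySem.Chars.join ['.'] (PySem.List.slice parts (some (-2)) none)
    if 2 < parts.length ∧ PySem.Set.contains pvMulti tail2 = true then
      some (String.ofList tail2)
    else
      -- splitting always yields at least one piece, so parts[-1] never raises
      some (String.ofList (PySem.List.pyGetD parts (-1) []))

-- ===== PRECONDITION & SPEC =====
def Spec_extract_tld (domain : String) (out : Option String) : Prop := out = extract_tld_alt domain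
instance (domain : String) (out : Option String) : Decidable (Spec_extract_tld domain out) := by unfold Spec_extract_tld; infer_instance

-- ===== CLAIM (what is proved, stated in full; the proofs are below) =====
def Claim_equal_extract_tld : Prop := ∀ (domain : String), Dom_extract_tld domain → Spec_extract_tld domain (extract_tld domain)

-- ===== LEMMAS AND PROOFS =====

-- structural model of Python's split at the dot separator
def pvSplit : List Char → List (List Char)
  | [] => [[]]
  | c :: rest => if c = '.' then [] :: pvSplit rest else (pvSplit rest).modifyHead (c :: ·)

theorem pvSplit_ne_nil : ∀ s : List Char, pvSplit s ≠ []
  | [] => by simp [pvSplit]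
  | c :: rest => by
    have h := pvSplit_ne_nil rest
    cases hr : pvSplit rest with
    | nil => exact absurd hr h
    | cons a l => simp [pvSplit, hr, List.modifyHead]; split_ifs <;> simp

theorem pvSplitOn_go (fuel : Nat) : ∀ (l cur : List Char) (acc : List (List Char)),
    l.length < fuel →
    PySem.Chars.splitOn.go ['.'] fuel l cur acc
      = acc.reverse ++ (pvSplit l).modifyHead (cur.reverse ++ ·) := by
  induction fuel with
  | zero => intro l cur acc h; omega
  | succ n ih =>
    intro l cur acc h
    cases l with
    | nil =>
      rw [PySem.Chars.splitOn.go.eq_def]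
      simp [pvSplit, List.modifyHead]
    | cons c rest =>
      rw [PySem.Chars.splitOn.go.eq_def]
      by_cases hc : c = '.'
      · subst hc
        simp only [List.isPrefixOf, BEq.rfl, Bool.and_eq_true, and_true, if_true,
          List.length_cons, List.drop_succ_cons, List.length_nil, List.drop_zero]
        rw [ih rest [] _ (by simpa using Nat.lt_of_succ_lt_succ h)]
        cases hr : pvSplit rest with
        | nil => exact absurd hr (pvSplit_ne_nil rest)
        | cons a l => simp [pvSplit, hr, List.modifyHead]
      · have hpre : (['.'] : List Char).isPrefixOf (c :: rest) = false := by
          simp [List.isPrefixOf]; exact fun hEq => hc hEq.symm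
        simp only [hpre, if_false, Bool.false_eq_true]
        rw [ih rest (c :: cur) acc (by simpa using Nat.lt_of_succ_lt_succ h)]
        cases hr : pvSplit rest with
        | nil => exact absurd hr (pvSplit_ne_nil rest)
        | cons a l => simp [pvSplit, hr, List.modifyHead, hc]

theorem splitOn_eq_pvSplit (s : List Char) : PySem.Chars.splitOn s ['.'] = pvSplit s := by
  rw [PySem.Chars.splitOn, pvSplitOn_go (s.length + 1) s [] [] (by omega)]
  cases hr : pvSplit s with
  | nil => exact absurd hr (pvSplit_ne_nil s)
  | cons a l => simp [List.modifyHead]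

theorem pvSplit_append (xs ys : List Char) :
    pvSplit (xs ++ '.' :: ys) = pvSplit xs ++ pvSplit ys := by
  induction xs with
  | nil => simp [pvSplit]
  | cons a xs ih =>
    by_cases ha : a = '.'
    · simp [pvSplit, ha, ih]
    · cases hr : pvSplit xs with
      | nil => exact absurd hr (pvSplit_ne_nil xs)
      | cons b l => simp [pvSplit, ha, ih, hr, List.modifyHead]

theorem pvSplit_no_dot : ∀ u : List Char, '.' ∉ u → pvSplit u = [u]
  | [], _ => by simp [pvSplit]
  | c :: u, h => by
    have hc : c ≠ '.' := fun hEq => h (hEq ▸ List.mem_cons_self ..)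
    have hu : '.' ∉ u := fun hm => h (List.mem_cons_of_mem _ hm)
    simp [pvSplit, hc, pvSplit_no_dot u hu, List.modifyHead]

theorem no_dot_of_mem_pvSplit : ∀ (s p : List Char), p ∈ pvSplit s → '.' ∉ p
  | [], p, hp => by simp [pvSplit] at hp; simp [hp]
  | c :: rest, p, hp => by
    by_cases hc : c = '.'
    · simp [pvSplit, hc] at hp
      rcases hp with rfl | hp
      · simp
      · exact no_dot_of_mem_pvSplit rest p hp
    · cases hr : pvSplit rest with
      | nil => exact absurd hr (pvSplit_ne_nil rest)
      | cons a l =>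
        simp [pvSplit, hc, hr, List.modifyHead] at hp
        rcases hp with rfl | hp
        · have ha : '.' ∉ a :=
            no_dot_of_mem_pvSplit rest a (hr ▸ List.mem_cons_self ..)
          simp [ha]
          exact fun hEq => hc hEq.symm
        · exact no_dot_of_mem_pvSplit rest p (hr ▸ List.mem_cons_of_mem _ hp)

theorem join_pvSplit : ∀ s : List Char, PySem.Chars.join ['.'] (pvSplit s) = s
  | [] => by simp [pvSplit, PySem.Chars.join_singleton]
  | c :: rest => by
    have ih := join_pvSplit rest
    cases hr : pvSplit rest with
    | nil => exact absurd hr (pvSplit_ne_nil rest)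
    | cons a l =>
      rw [hr] at ih
      by_cases hc : c = '.'
      · simp [pvSplit, hc, hr, PySem.Chars.join_cons_cons, ih]
      · cases l with
        | nil =>
          simp [PySem.Chars.join_singleton] at ih
          simp [pvSplit, hc, hr, List.modifyHead, PySem.Chars.join_singleton, ih]
        | cons b l' =>
          simp [pvSplit, hc, hr, List.modifyHead, PySem.Chars.join_cons_cons] at *
          simp [ih]

theorem join_pair (u v : List Char) : PySem.Chars.join ['.'] [u, v] = u ++ '.' :: v := by
  rw [PySem.Chars.join_cons_cons, PySem.Chars.join_singleton]; simp

theorem join_append_pair : ∀ (q : List Char) (qs : List (List Char)) (u v : List Char),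
    PySem.Chars.join ['.'] ((q :: qs) ++ [u, v])
      = PySem.Chars.join ['.'] (q :: qs) ++ '.' :: (u ++ '.' :: v)
  | q, [], u, v => by
    simp [PySem.Chars.join_cons_cons, PySem.Chars.join_singleton]
  | q, r :: qs, u, v => by
    have ih := join_append_pair r qs u v
    simp only [List.cons_append, PySem.Chars.join_cons_cons] at *
    simp [ih]

theorem keyFwd (s u v : List Char) (hu : '.' ∉ u) (hv : '.' ∉ v)
    (h : PySem.Chars.endswith s ('.' :: (u ++ '.' :: v)) = true) :
    ∃ q, q ≠ [] ∧ pvSplit s = q ++ [u, v] := by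
  obtain ⟨p, hp⟩ := (PySem.Chars.endswith_iff _ _).mp h
  refine ⟨pvSplit p, pvSplit_ne_nil p, ?_⟩
  rw [← hp, pvSplit_append, pvSplit_append, pvSplit_no_dot u hu, pvSplit_no_dot v hv]
  simp

theorem keyBwd (s u v : List Char) (q : List (List Char)) (hq : q ≠ [])
    (h : pvSplit s = q ++ [u, v]) :
    PySem.Chars.endswith s ('.' :: (u ++ '.' :: v)) = true := by
  cases q with
  | nil => exact absurd rfl hq
  | cons q0 qs =>
    rw [PySem.Chars.endswith_iff]
    refine ⟨PySem.Chars.join ['.'] (q0 :: qs), ?_⟩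
    have hs : PySem.Chars.join ['.'] (pvSplit s) = s := join_pvSplit s
    rw [h, join_append_pair] at hs
    exact hs

theorem pvFindTld_some (s t : List Char) : ∀ ts : List (List Char),
    pvFindTld s ts = some t →
    t ∈ ts ∧ PySem.Chars.endswith s ('.' :: t) = true
  | [], h => by simp [pvFindTld] at h
  | t' :: ts, h => by
    by_cases he : PySem.Chars.endswith s ('.' :: t') = true
    · simp [pvFindTld, he] at h
      subst h; exact ⟨List.mem_cons_self .., he⟩
    · simp [pvFindTld, he] at h
      obtain ⟨hm, hv⟩ := pvFindTld_some s t ts h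
      exact ⟨List.mem_cons_of_mem _ hm, hv⟩

theorem pvFindTld_none (s : List Char) : ∀ ts : List (List Char),
    pvFindTld s ts = none →
    ∀ t ∈ ts, PySem.Chars.endswith s ('.' :: t) = false
  | [], _, t, ht => by simp at ht
  | t' :: ts, h, t, ht => by
    by_cases he : PySem.Chars.endswith s ('.' :: t') = true
    · simp [pvFindTld, he] at h
    · simp [pvFindTld, he] at h
      rcases List.mem_cons.mp ht with rfl | hm
      · simpa using he
      · exact pvFindTld_none s ts h t hm

theorem mem_dropWhile_of_not (l : List Char) (p : Char → Bool) (c : Char)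
    (hc : c ∈ l) (hp : p c = false) : c ∈ l.dropWhile p := by
  have := List.takeWhile_append_dropWhile (p := p) (l := l)
  rw [← this] at hc
  rcases List.mem_append.mp hc with h | h
  · have := List.mem_takeWhile_imp h
    rw [hp] at this; cases this
  · exact h

theorem mem_strip (l : List Char) (c : Char) (hc : c ∈ l)
    (hs : PySem.Chars.isspace c = false) : c ∈ PySem.Chars.strip l := by
  rw [PySem.Chars.strip, PySem.Chars.rstrip, PySem.Chars.lstrip]
  rw [List.mem_reverse]
  refine mem_dropWhile_of_not _ _ _ ?_ hs
  rw [List.mem_reverse]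
  exact mem_dropWhile_of_not _ _ _ hc hs

theorem two_le_length_pvSplit (s : List Char) (h : '.' ∈ s) :
    2 ≤ (pvSplit s).length := by
  obtain ⟨xs, ys, rfl⟩ := List.append_of_mem h
  rw [pvSplit_append]
  have h1 := List.length_pos_iff.mpr (pvSplit_ne_nil xs)
  have h2 := List.length_pos_iff.mpr (pvSplit_ne_nil ys)
  simp only [List.length_append]; omega

theorem slice_last_two {α : Type} (q : List α) (u v : α) :
    PySem.List.slice (q ++ [u, v]) (some (-2)) none = [u, v] := by
  rw [PySem.List.slice_from_neg_ofNat _ 2 (by omega)]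
  have hl : (q ++ [u, v]).length - 2 = q.length := by simp
  rw [hl, List.drop_left]

theorem exists_last_two {α : Type} (l : List α) (h : 2 < l.length) :
    ∃ (q : List α) (u v : α), l = q ++ [u, v] ∧ q ≠ [] := by
  rcases hr : l.reverse with _ | ⟨v, _ | ⟨u, rq⟩⟩
  · have hl : l = [] := by rw [← List.reverse_reverse l, hr]; simp
    rw [hl] at h; simp at h
  · have hl : l = [v] := by rw [← List.reverse_reverse l, hr]; simp
    rw [hl] at h; simp at h
  · refine ⟨rq.reverse, u, v, ?_, ?_⟩
    · have := congrArg List.reverse hr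
      simpa using this
    · have hlen := congrArg List.length hr
      simp at hlen
      intro hnil
      have hrq : rq = [] := by simpa using hnil
      rw [hrq] at hlen
      simp at hlen
      omega

-- B's branch evaluates to the matched multi-level TLD whenever the domain ends with it
theorem altBody_of_ends (dl u v : List Char) (hu : '.' ∉ u) (hv : '.' ∉ v)
    (hmem : PySem.Set.contains pvMulti (u ++ '.' :: v) = true)
    (hends : PySem.Chars.endswith dl ('.' :: (u ++ '.' :: v)) = true) :
    (let parts := PySem.Chars.splitOn dl ['.'];
     let tail2 := PySem.Chars.join ['.'] (PySem.List.slice parts (some (-2)) none);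
     if 2 < parts.length ∧ PySem.Set.contains pvMulti tail2 = true then
       some (String.ofList tail2)
     else some (String.ofList (PySem.List.pyGetD parts (-1) [])))
      = some (String.ofList (u ++ '.' :: v)) := by
  obtain ⟨q, hq, hsplit⟩ := keyFwd dl u v hu hv hends
  simp only [splitOn_eq_pvSplit, hsplit, slice_last_two, join_pair]
  rw [if_pos]
  constructor
  · have := List.length_pos_iff.mpr hq
    simp only [List.length_append, List.length_cons, List.length_nil]
    omega
  · exact hmem

-- ===== VERDICT (by name: the statement is the Claim_ definition above) =====
theorem extract_tld_spec : Claim_equal_extract_tld := by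
  intro domain _
  unfold Spec_extract_tld extract_tld extract_tld_alt
  by_cases hg : domain.toList = [] ∨ PySem.Chars.isIn ['.'] domain.toList = false
  · rw [if_pos hg, if_pos hg]
  · rw [if_neg hg, if_neg hg]
    obtain ⟨hne, hin⟩ := not_or.mp hg
    have hin' : PySem.Chars.isIn ['.'] domain.toList = true := by
      cases hI : PySem.Chars.isIn ['.'] domain.toList
      · exact absurd hI hin
      · rfl
    have hdot : ('.' : Char) ∈ PySem.Chars.strip (PySem.Chars.lower domain.toList) := by
      have h1 : ('.' : Char) ∈ domain.toList :=
        ((PySem.Chars.isIn_iff_infix _ _).mp hin').subset (List.mem_cons_self ..)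
      have h2 : ('.' : Char) ∈ PySem.Chars.lower domain.toList := by
        rw [PySem.Chars.lower]
        exact List.mem_map.mpr ⟨'.', h1, by decide⟩
      exact mem_strip _ _ h2 (by decide)
    cases hf : pvFindTld (PySem.Chars.strip (PySem.Chars.lower domain.toList)) pvTldsA with
    | some t =>
      simp only [hf]
      obtain ⟨hmem, hends⟩ :=
        pvFindTld_some (PySem.Chars.strip (PySem.Chars.lower domain.toList)) t pvTldsA hf
      simp only [pvTldsA, List.mem_cons, List.not_mem_nil, or_false] at hmem
      rcases hmem with rfl | rfl | rfl | rfl | rfl | rfl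
      · exact (altBody_of_ends _ ['o','r','g'] ['u','k'] (by decide) (by decide) (by decide) hends).symm
      · exact (altBody_of_ends _ ['c','o','m'] ['a','u'] (by decide) (by decide) (by decide) hends).symm
      · exact (altBody_of_ends _ ['c','o','m'] ['b','r'] (by decide) (by decide) (by decide) hends).symm
      · exact (altBody_of_ends _ ['c','o','m'] ['m','x'] (by decide) (by decide) (by decide) hends).symm
      · exact (altBody_of_ends _ ['c','o'] ['u','k'] (by decide) (by decide) (by decide) hends).symm
      · exact (altBody_of_ends _ ['m','e'] ['u','k'] (by decide) (by decide) (by decide) hends).symm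
    | none =>
      simp only [hf]
      have hnone := pvFindTld_none (PySem.Chars.strip (PySem.Chars.lower domain.toList)) pvTldsA hf
      have hlen2 := two_le_length_pvSplit _ hdot
      simp only [splitOn_eq_pvSplit]
      rw [if_neg (by omega : ¬ (pvSplit (PySem.Chars.strip (PySem.Chars.lower domain.toList))).length < 2)]
      rw [if_neg]
      rintro ⟨hlen, hcont⟩
      obtain ⟨q, u, v, hsplit, hq⟩ := exists_last_two _ hlen
      rw [hsplit, slice_last_two, join_pair] at hcont
      have htld : (u ++ '.' :: v) ∈ pvTldsA := by
        have hmem := (PySem.Set.contains_iff _ _).mp hcont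
        rw [pvMulti, PySem.Set.mem_ofList] at hmem
        simp only [List.mem_cons, List.not_mem_nil, or_false] at hmem
        rcases hmem with h | h | h | h | h | h <;> simp [pvTldsA, h]
      have hfalse := hnone _ htld
      have htrue := keyBwd _ u v q hq hsplit
      rw [htrue] at hfalse
      cases hfalse
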